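-- pv_equiv track=rewrite | github.com/TianGzlab/OmicsClaw | scripts/skill_lint.py | _check_body
-- ===== SOURCE A (Python) =====
-- REQUIRED_SECTIONS = (
--     "## When to use",
--     "## Inputs & Outputs",
--     "## Flow",
--     "## Gotchas",
--     "## Key CLI",
--     "## See also",
-- )
--
-- MAX_BODY_LINES = 200
--
-- def _check_body(body: str) -> list[str]:
--     errors: list[str] = []
--     line_count = len(body.splitlines())
--     if line_count > MAX_BODY_LINES:
--         errors.append(
--             f"body: exceeds {MAX_BODY_LINES} lines (found {line_count})"
--         )
--     # Line-anchored match: a heading must start the line (after optional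
--     # whitespace).  Avoids false positives from HTML comments or prose that
--     # quotes a section name inline.
--     body_lines = [ln.lstrip() for ln in body.splitlines()]
--     for section in REQUIRED_SECTIONS:
--         if not any(line.startswith(section) for line in body_lines):
--             errors.append(f"body: missing required section '{section}'")
--     return errors
-- ===== SOURCE B (Python) =====
-- REQUIRED_SECTIONS = (
--     "## When to use",
--     "## Inputs & Outputs",
--     "## Flow",
--     "## Gotchas",
--     "## Key CLI",
--     "## See also",
-- )
--
-- MAX_BODY_LINES = 200
--
--
-- def _check_body(body: str) -> list[str]:
--     lines = body.splitlines()
--     errors = (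
--         [f"body: exceeds {MAX_BODY_LINES} lines (found {len(lines)})"]
--         if len(lines) > MAX_BODY_LINES
--         else []
--     )
--     found = set()
--     for ln in lines:
--         stripped = ln.lstrip()
--         for section in REQUIRED_SECTIONS:
--             if stripped.startswith(section):
--                 found.add(section)
--     return errors + [
--         f"body: missing required section '{s}'" for s in REQUIRED_SECTIONS if s not in found
--     ]
-- ===== Notes on version B (the rewrite author's own statement) =====
-- stated objective: alternative
-- what changed: Replaces A's six independent any()-scans over all lines with a single pass over the lines that accumulates a presence set of matched sections, followed by one membership check per required section.
import Mathlib
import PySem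

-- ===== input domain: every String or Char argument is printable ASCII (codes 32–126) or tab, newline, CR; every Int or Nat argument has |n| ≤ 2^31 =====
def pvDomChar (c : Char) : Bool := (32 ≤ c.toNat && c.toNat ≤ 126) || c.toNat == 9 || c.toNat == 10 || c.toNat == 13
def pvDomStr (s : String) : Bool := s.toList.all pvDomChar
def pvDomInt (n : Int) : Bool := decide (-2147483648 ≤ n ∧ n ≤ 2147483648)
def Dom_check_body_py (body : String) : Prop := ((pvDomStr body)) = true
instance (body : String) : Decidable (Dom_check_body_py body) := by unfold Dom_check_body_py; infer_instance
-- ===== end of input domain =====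

-- B replaces A's six independent any()-scans over the lines by one pass building a
-- presence set of matched sections, then a per-section membership check (alternative).

def pvSections : List String :=
  ["## When to use", "## Inputs & Outputs", "## Flow", "## Gotchas", "## Key CLI", "## See also"]

-- ===== PORT A =====
def check_body_py (body : String) : List String :=
  let errors : List String := []
  let line_count : Int := ((PySem.Str.splitlines body).length : Int)
  let errors :=
    if line_count > 200 then
      errors ++ ["body: exceeds 200 lines (found " ++ PySem.Int.toStr line_count ++ ")"]
    else errors
  let body_lines := (PySem.Str.splitlines body).map PySem.Str.lstrip
  pvSections.foldl (fun errs sec =>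
    if !(body_lines.any fun line => PySem.Str.startswith line sec) then
      errs ++ ["body: missing required section '" ++ sec ++ "'"]
    else errs) errors

-- ===== PORT B =====
def check_body_py_alt (body : String) : List String :=
  let lines := PySem.Str.splitlines body
  let errors : List String :=
    if ((lines.length : Int)) > 200 then
      ["body: exceeds 200 lines (found " ++ PySem.Int.toStr (lines.length : Int) ++ ")"]
    else []
  let found : PySem.Set String :=
    lines.foldl (fun acc ln =>
      let stripped := PySem.Str.lstrip ln
      pvSections.foldl (fun acc sec =>
        if PySem.Str.startswith stripped sec then PySem.Set.add acc sec else acc) acc)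
      PySem.Set.empty
  errors ++
    (pvSections.filter (fun s => !(PySem.Set.contains found s))).map
      (fun s => "body: missing required section '" ++ s ++ "'")

-- ===== PRECONDITION & SPEC =====
def Spec_check_body_py (body : String) (out : List String) : Prop := out = check_body_py_alt body
instance (body : String) (out : List String) : Decidable (Spec_check_body_py body out) := by unfold Spec_check_body_py; infer_instance

-- ===== CLAIM (what is proved, stated in full; the proofs are below) =====
def Claim_equal_check_body_py : Prop := ∀ (body : String), Dom_check_body_py body → Spec_check_body_py body (check_body_py body)

-- ===== LEMMAS AND PROOFS =====

-- membership in the inner (per-line) fold over the sections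
theorem pv_mem_inner (secs : List String) (acc : PySem.Set String) (stripped s : String) :
    s ∈ secs.foldl (fun acc sec =>
        if PySem.Str.startswith stripped sec then PySem.Set.add acc sec else acc) acc ↔
      s ∈ acc ∨ (s ∈ secs ∧ PySem.Str.startswith stripped s = true) := by
  induction secs generalizing acc with
  | nil => simp
  | cons x xs ih =>
    simp only [List.foldl_cons, List.mem_cons]
    by_cases hx : PySem.Str.startswith stripped x = true
    · rw [if_pos hx, ih, PySem.Set.mem_add]
      constructor
      · rintro (⟨h | rfl⟩ | ⟨hm, hp⟩)
        · exact Or.inl h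
        · exact Or.inr ⟨Or.inl rfl, hx⟩
        · exact Or.inr ⟨Or.inr hm, hp⟩
      · rintro (h | ⟨(rfl | hm), hp⟩)
        · exact Or.inl (Or.inl h)
        · exact Or.inl (Or.inr rfl)
        · exact Or.inr ⟨hm, hp⟩
    · rw [if_neg hx, ih]
      constructor
      · rintro (h | ⟨hm, hp⟩)
        · exact Or.inl h
        · exact Or.inr ⟨Or.inr hm, hp⟩
      · rintro (h | ⟨(rfl | hm), hp⟩)
        · exact Or.inl h
        · exact absurd hp hx
        · exact Or.inr ⟨hm, hp⟩

-- membership in the outer fold over the lines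
theorem pv_mem_outer (lines : List String) (acc : PySem.Set String) (s : String) :
    s ∈ lines.foldl (fun acc ln =>
        let stripped := PySem.Str.lstrip ln
        pvSections.foldl (fun acc sec =>
          if PySem.Str.startswith stripped sec then PySem.Set.add acc sec else acc) acc) acc ↔
      s ∈ acc ∨ (s ∈ pvSections ∧ ∃ ln ∈ lines, PySem.Str.startswith (PySem.Str.lstrip ln) s = true) := by
  induction lines generalizing acc with
  | nil => simp
  | cons ln lns ih =>
    simp only [List.foldl_cons]
    rw [ih, pv_mem_inner]
    constructor
    · rintro ((h | ⟨hm, hp⟩) | ⟨hm, ln', hln', hp⟩)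
      · exact Or.inl h
      · exact Or.inr ⟨hm, ln, List.mem_cons_self, hp⟩
      · exact Or.inr ⟨hm, ln', List.mem_cons_of_mem _ hln', hp⟩
    · rintro (h | ⟨hm, ln', hln', hp⟩)
      · exact Or.inl (Or.inl h)
      · rcases List.mem_cons.mp hln' with rfl | hln'
        · exact Or.inl (Or.inr ⟨hm, hp⟩)
        · exact Or.inr ⟨hm, ln', hln', hp⟩

-- for a required section, presence in the found set equals A's any()-scan
theorem pv_contains_found (lines : List String) (s : String) (hs : s ∈ pvSections) :
    PySem.Set.contains
      (lines.foldl (fun acc ln =>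
        let stripped := PySem.Str.lstrip ln
        pvSections.foldl (fun acc sec =>
          if PySem.Str.startswith stripped sec then PySem.Set.add acc sec else acc) acc)
        PySem.Set.empty) s
    = lines.any (fun ln => PySem.Str.startswith (PySem.Str.lstrip ln) s) := by
  rw [Bool.eq_iff_iff, PySem.Set.contains_iff, pv_mem_outer, List.any_eq_true]
  simp only [PySem.Set.empty, List.not_mem_nil, false_or]
  exact ⟨fun ⟨_, h⟩ => h, fun h => ⟨hs, h⟩⟩

-- ===== VERDICT (by name: the statement is the Claim_ definition above) =====
theorem check_body_py_spec : Claim_equal_check_body_py := by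
  intro body _
  unfold Spec_check_body_py check_body_py check_body_py_alt
  simp only [List.nil_append]
  rw [PySem.List.foldl_append_if]
  congr 1
  apply congrArg
  apply List.filter_congr
  intro s hs
  rw [pv_contains_found _ _ hs, List.any_map]
  rfl
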